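-- pv_equiv track=rewrite | github.com/Daniel-OD/Recovery_HDD | ext4rescue/ext4/recover.py | _is_sparse_group
-- ===== SOURCE A (Python) =====
-- def _is_sparse_group(group: int) -> bool:
--     if group <= 1:
--         return True
--     if group % 2 == 0:
--         return False
--     for base in (3, 5, 7):
--         n = base
--         while n < group:
--             n *= base
--         if n == group:
--             return True
--     return False
-- ===== SOURCE B (Python) =====
-- def _is_sparse_group(group: int) -> bool:
--     if group <= 1:
--         return True
--     for base in (3, 5, 7):
--         n = group
--         while n % base == 0:
--             n //= base
--         if n == 1:
--             return True
--     return False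
-- ===== Notes on version B (the rewrite author's own statement) =====
-- stated objective: simpler
-- what changed: B tests power-of-base by dividing group down by each base until indivisible and checking the remainder is 1, instead of A's multiplying the base up toward group; the redundant even-number early reject is dropped.
import Mathlib
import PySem

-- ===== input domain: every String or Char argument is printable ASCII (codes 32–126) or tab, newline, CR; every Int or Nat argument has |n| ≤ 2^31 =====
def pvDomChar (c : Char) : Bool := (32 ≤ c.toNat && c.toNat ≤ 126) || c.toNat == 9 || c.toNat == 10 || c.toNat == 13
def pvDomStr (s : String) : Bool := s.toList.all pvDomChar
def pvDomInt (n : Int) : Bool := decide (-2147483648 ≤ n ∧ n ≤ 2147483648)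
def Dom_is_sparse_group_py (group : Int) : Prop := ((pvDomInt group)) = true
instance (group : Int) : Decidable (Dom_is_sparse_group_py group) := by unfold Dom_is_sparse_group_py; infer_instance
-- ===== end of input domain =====

-- B replaces A's multiply-up power test (n = base; n *= base while n < group) by dividing
-- group down by each base and checking the remainder is 1, dropping A's redundant even-number
-- early reject; objective: simpler. Equivalence of the RETURN value is proved for all Int inputs.

-- ===== PORT A =====
-- A's inner 'while n < group: n *= base'.  The extra conjunct 'n < n * b' is a pure totality
-- guard: it always holds on the states the port reaches (n ≥ 3, b ≥ 3) and makes the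
-- recursion well-founded.
def upA (b g n : Int) : Int :=
  if h : n < g ∧ n < n * b then upA b g (n * b) else n
termination_by (g - n).toNat
decreasing_by omega

-- A's 'for base in (3, 5, 7): … if n == group: return True', transliterated over the tuple.
def aLoop (g : Int) : List Int → Bool
  | [] => false
  | b :: rest => if upA b g b = g then true else aLoop g rest

def is_sparse_group_py (group : Int) : Bool :=
  if group ≤ 1 then true
  else if PySem.Int.mod group 2 = 0 then false
  else aLoop group [3, 5, 7]

-- ===== PORT B =====
-- B's inner 'while n % base == 0: n //= base'.  The conjuncts '1 < n ∧ 1 < b' are pure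
-- totality guards: they always hold on the states the port reaches (n ≥ 2 divisible by
-- b ≥ 3 forces the quotient ≥ 1) and make the recursion well-founded.
def downB (b n : Int) : Int :=
  if h : PySem.Int.mod n b = 0 ∧ 1 < n ∧ 1 < b then downB b (PySem.Int.floordiv n b) else n
termination_by n.toNat
decreasing_by
  obtain ⟨h0, hn, hb⟩ := h
  obtain ⟨q, hq⟩ := (PySem.Int.mod_eq_zero_iff_dvd n b).mp h0
  have hq1 : 1 ≤ q := by nlinarith
  have hfd : PySem.Int.floordiv n b = q := by
    rw [PySem.Int.floordiv_eq_ediv_of_pos (by omega), hq, Int.mul_ediv_cancel_left _ (by omega)]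
  have hlt : q < n := by nlinarith
  simp only [hfd]; omega

-- B's 'for base in (3, 5, 7): … if n == 1: return True'.
def bLoop (g : Int) : List Int → Bool
  | [] => false
  | b :: rest => if downB b g = 1 then true else bLoop g rest

def is_sparse_group_py_alt (group : Int) : Bool :=
  if group ≤ 1 then true
  else bLoop group [3, 5, 7]

-- ===== PRECONDITION & SPEC =====
def Spec_is_sparse_group_py (group : Int) (out : Bool) : Prop := out = is_sparse_group_py_alt group
instance (group : Int) (out : Bool) : Decidable (Spec_is_sparse_group_py group out) := by unfold Spec_is_sparse_group_py; infer_instance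

-- ===== CLAIM (what is proved, stated in full; the proofs are below) =====
def Claim_equal_is_sparse_group_py : Prop := ∀ (group : Int), Dom_is_sparse_group_py group → Spec_is_sparse_group_py group (is_sparse_group_py group)

-- ===== LEMMAS AND PROOFS =====

-- A's multiply-up loop reaches g exactly when g = n·bᵏ for some k ≥ 0.
lemma upA_eq_iff (b g n : Int) (hb : 2 ≤ b) (hn : 1 ≤ n) :
    upA b g n = g ↔ ∃ k : ℕ, n * b ^ k = g := by
  fun_induction upA b g n with
  | case1 n h ih =>
    obtain ⟨hlt, _⟩ := h
    have hnb : 1 ≤ n * b := by nlinarith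
    rw [ih hnb]
    constructor
    · rintro ⟨k, hk⟩; exact ⟨k + 1, by rw [pow_succ]; ring_nf; ring_nf at hk; linarith⟩
    · rintro ⟨k, hk⟩
      cases k with
      | zero => simp at hk; omega
      | succ j => exact ⟨j, by rw [pow_succ] at hk; ring_nf; ring_nf at hk; linarith⟩
  | case2 n h =>
    rw [not_and_or] at h
    rcases h with h | h
    · -- g ≤ n : loop never ran
      constructor
      · intro hgn; exact ⟨0, by simpa using hgn⟩
      · rintro ⟨k, hk⟩
        have h1 : (1 : Int) ≤ b ^ k := one_le_pow₀ (by omega)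
        nlinarith
    · -- n * b ≤ n is impossible for 1 ≤ n, 2 ≤ b
      exfalso; nlinarith

-- B's divide-down loop reaches 1 exactly when n = bᵏ for some k ≥ 0.
lemma downB_eq_one_iff (b n : Int) (hb : 2 ≤ b) (hn : 1 ≤ n) :
    downB b n = 1 ↔ ∃ k : ℕ, n = b ^ k := by
  fun_induction downB b n with
  | case1 n h ih =>
    obtain ⟨h0, hn1, hb1⟩ := h
    obtain ⟨q, hq⟩ := (PySem.Int.mod_eq_zero_iff_dvd n b).mp h0
    have hq1 : 1 ≤ q := by nlinarith
    have hfd : PySem.Int.floordiv n b = q := by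
      rw [PySem.Int.floordiv_eq_ediv_of_pos (by omega), hq, Int.mul_ediv_cancel_left _ (by omega)]
    rw [hfd] at ih ⊢
    rw [ih hq1]
    constructor
    · rintro ⟨k, hk⟩; exact ⟨k + 1, by rw [pow_succ]; rw [hq, hk]; ring⟩
    · rintro ⟨k, hk⟩
      cases k with
      | zero => exact absurd hk (by rw [pow_zero]; omega)
      | succ j =>
        refine ⟨j, mul_left_cancel₀ (show b ≠ 0 by omega) ?_⟩
        rw [pow_succ] at hk
        rw [← hq, hk]; ring
  | case2 n h =>
    constructor
    · intro h1; exact ⟨0, by simpa using h1⟩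
    · rintro ⟨k, hk⟩
      cases k with
      | zero => simpa using hk
      | succ j =>
        exfalso; apply h
        refine ⟨(PySem.Int.mod_eq_zero_iff_dvd n b).mpr ⟨b ^ j, by rw [hk, pow_succ]; ring⟩, ?_, by omega⟩
        have h1 : (1 : Int) ≤ b ^ j := one_le_pow₀ (by omega)
        rw [hk, pow_succ]; nlinarith

-- For g ≥ 2 the two per-base tests agree.
lemma base_test_eq (b g : Int) (hb : 2 ≤ b) (hg : 2 ≤ g) :
    (upA b g b = g) ↔ (downB b g = 1) := by
  rw [upA_eq_iff b g b hb (by omega), downB_eq_one_iff b g hb (by omega)]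
  constructor
  · rintro ⟨k, hk⟩; exact ⟨k + 1, by rw [pow_succ]; rw [← hk]; ring⟩
  · rintro ⟨k, hk⟩
    cases k with
    | zero => simp at hk; omega
    | succ j => exact ⟨j, by rw [hk, pow_succ]; ring⟩

-- An even g ≥ 2 is no power of an odd base, so B's per-base test fails on it.
lemma even_not_pow (b g : Int) (hb : 2 ≤ b) (hbo : ¬ (2 ∣ b)) (hg : 2 ≤ g) (he : 2 ∣ g) :
    downB b g ≠ 1 := by
  rw [Ne, downB_eq_one_iff b g hb (by omega)]
  rintro ⟨k, hk⟩
  have hob : Odd b := Int.odd_iff.mpr (by omega)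
  have hogk : Odd (b ^ k) := hob.pow
  rw [← hk] at hogk
  rcases hogk with ⟨m, hm⟩
  omega

-- ===== VERDICT (by name: the statement is the Claim_ definition above) =====
theorem is_sparse_group_py_spec : Claim_equal_is_sparse_group_py := by
  intro g _
  unfold Spec_is_sparse_group_py is_sparse_group_py is_sparse_group_py_alt
  by_cases h1 : g ≤ 1
  · simp [h1]
  · have hg : (2 : Int) ≤ g := by omega
    by_cases he : PySem.Int.mod g 2 = 0
    · have h2 : (2 : Int) ∣ g := (PySem.Int.mod_eq_zero_iff_dvd g 2).mp he
      have e3 := even_not_pow 3 g (by omega) (by omega) hg h2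
      have e5 := even_not_pow 5 g (by omega) (by omega) hg h2
      have e7 := even_not_pow 7 g (by omega) (by omega) hg h2
      simp [h1, bLoop, e3, e5, e7]
      intro hodd
      exact absurd hodd (by omega)
    · have t3 := base_test_eq 3 g (by omega) hg
      have t5 := base_test_eq 5 g (by omega) hg
      have t7 := base_test_eq 7 g (by omega) hg
      simp only [h1, he, if_false]
      simp [aLoop, bLoop, t3, t5, t7]
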